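-- pv_equiv track=rewrite | github.com/hakrrr/Cpp-Python-Learning | Python/Challenge/Number5.py | solve
-- ===== SOURCE A (Python) =====
-- def solve(n, a, b):
--     d = {}
--     res = 0
--     for x in a:
--         d[int(x)] = 1
--     for x in b:
--         d[int(x)] = -1
--     for i in n:
--         try:
--             res += d[int(i)]
--         except (ValueError, KeyError):
--             pass
--     return res
-- ===== SOURCE B (Python) =====
-- def solve(n, a, b):
--     # Count-then-weigh: tally how often each parsed value occurs in n, then
--     # sum the tallies over the key sets (b's keys score -1, a's keys not
--     # overridden by b score +1), instead of scoring each item of n as it passes.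
--     sb = {int(x) for x in b}
--     sa = {int(x) for x in a} - sb
--     cnt = {}
--     for i in n:
--         try:
--             v = int(i)
--         except ValueError:
--             continue
--         cnt[v] = cnt.get(v, 0) + 1
--     return sum(cnt.get(v, 0) for v in sa) - sum(cnt.get(v, 0) for v in sb)
-- ===== Notes on version B (the rewrite author's own statement) =====
-- stated objective: alternative
-- what changed: Inverts the aggregation: instead of precomputing a +1/-1 dict and scoring each element of n via try/except lookup, B builds a frequency counter of the parsed values of n and then computes the result as a sum of counts over the two key sets (sum over a's keys minus b's overrides, minus sum over b's keys).
import Mathlib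
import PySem

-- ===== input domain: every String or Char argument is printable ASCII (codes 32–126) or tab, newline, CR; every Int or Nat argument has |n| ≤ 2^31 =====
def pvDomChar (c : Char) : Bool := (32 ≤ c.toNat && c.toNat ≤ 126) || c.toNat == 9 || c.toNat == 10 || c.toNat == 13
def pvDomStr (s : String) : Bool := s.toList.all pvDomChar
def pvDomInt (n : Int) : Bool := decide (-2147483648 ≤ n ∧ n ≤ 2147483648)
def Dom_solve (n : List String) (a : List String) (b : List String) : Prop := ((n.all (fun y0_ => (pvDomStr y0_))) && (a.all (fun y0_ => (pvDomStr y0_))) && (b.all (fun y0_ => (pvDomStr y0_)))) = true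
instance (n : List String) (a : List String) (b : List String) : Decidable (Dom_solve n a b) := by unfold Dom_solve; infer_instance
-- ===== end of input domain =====

-- B inverts the aggregation: it tallies the parsed values of n into a frequency counter and
-- computes the result as sums of counts over the two key sets, instead of A's per-item
-- +1/-1 dict lookup under try/except; same cost, a different aggregation order.

-- ===== PORT A =====
-- for x in a: d[int(x)] = 1 ; for x in b: d[int(x)] = -1  (under Pre_ every int(x) parses;
-- the 'none => d' arm is a totality guard only)
def solve (n : List String) (a : List String) (b : List String) : Int :=
  let d : PySem.Dict Int Int :=
    a.foldl (fun d x => match PySem.Int.ofStr? x with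
      | some v => d.insert v 1
      | none => d) PySem.Dict.empty
  let d : PySem.Dict Int Int :=
    b.foldl (fun d x => match PySem.Int.ofStr? x with
      | some v => d.insert v (-1)
      | none => d) d
  n.foldl (fun res i => match PySem.Int.ofStr? i with
    | some v => match d.get? v with
      | none => res                          -- KeyError caught: pass
      | some s => res + s
    | none => res) 0                         -- ValueError caught: pass

-- ===== PORT B =====
-- sb = {int(x) for x in b}; sa = {int(x) for x in a} - sb  (under Pre_ every int(x) parses);
-- then cnt[v] = cnt.get(v, 0) + 1 over the parsed values of n, and
-- sum(cnt.get(v,0) for v in sa) - sum(cnt.get(v,0) for v in sb)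
def solve_alt (n : List String) (a : List String) (b : List String) : Int :=
  let sb : PySem.Set Int := PySem.Set.ofList (b.filterMap PySem.Int.ofStr?)
  let sa : PySem.Set Int := PySem.Set.diff (PySem.Set.ofList (a.filterMap PySem.Int.ofStr?)) sb
  let cnt : PySem.Dict Int Int :=
    n.foldl (fun d i => match PySem.Int.ofStr? i with
      | some v => d.insert v (d.getD v 0 + 1)
      | none => d) PySem.Dict.empty          -- ValueError: continue
  (sa.map (fun v => cnt.getD v 0)).sum - ((sb : List Int).map (fun v => cnt.getD v 0)).sum

-- ===== PRECONDITION & SPEC =====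
-- Pre_ excludes exactly the inputs where A raises: an element of a or b that int() rejects
-- (ValueError escapes the try, which only guards the n loop).
def Pre_solve (n : List String) (a : List String) (b : List String) : Prop :=
  (a.all (fun x => (PySem.Int.ofStr? x).isSome) && b.all (fun x => (PySem.Int.ofStr? x).isSome)) = true
instance (n : List String) (a : List String) (b : List String) : Decidable (Pre_solve n a b) := by unfold Pre_solve; infer_instance
def pvWitness_solve : List String × List String × List String := (["1", "2", "x"], ["1", "3"], ["2"])
def Spec_solve (n : List String) (a : List String) (b : List String) (out : Int) : Prop := out = solve_alt n a b
instance (n : List String) (a : List String) (b : List String) (out : Int) : Decidable (Spec_solve n a b out) := by unfold Spec_solve; infer_instance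

-- ===== CLAIM (what is proved, stated in full; the proofs are below) =====
def Claim_equal_solve : Prop := ∀ (n : List String) (a : List String) (b : List String), Dom_solve n a b → Pre_solve n a b → Spec_solve n a b (solve n a b)

-- ===== LEMMAS AND PROOFS =====

-- a fold that parses each string and acts on successes equals the fold over the parsed values
theorem foldl_match_ofStr? {σ : Type} (xs : List String) (f : σ → Int → σ) (s : σ) :
    xs.foldl (fun s x => match PySem.Int.ofStr? x with
      | some v => f s v
      | none => s) s
      = (xs.filterMap PySem.Int.ofStr?).foldl f s := by
  induction xs generalizing s with
  | nil => rfl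
  | cons x xs ih =>
    simp only [List.foldl_cons, List.filterMap_cons]
    cases PySem.Int.ofStr? x <;> simp [ih]

-- lookup after inserting the constant c at every key of vs
theorem get?_foldl_insert_const (vs : List Int) (d : PySem.Dict Int Int) (c v : Int) :
    (vs.foldl (fun d x => d.insert x c) d).get? v
      = if v ∈ vs then some c else d.get? v := by
  induction vs generalizing d with
  | nil => simp
  | cons x xs ih =>
    simp only [List.foldl_cons, ih, PySem.Dict.get?_insert, List.mem_cons]
    by_cases hx : v = x <;> by_cases hv : v ∈ xs <;> simp [hx, hv]

-- over a duplicate-free list, summing the indicator of one value gives its membership bit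
theorem sum_map_indicator (s : List Int) (v : Int) (h : s.Nodup) :
    (s.map (fun w => if w = v then (1 : Int) else 0)).sum
      = if v ∈ s then 1 else 0 := by
  induction s with
  | nil => simp
  | cons x xs ih =>
    simp only [List.nodup_cons] at h
    by_cases hx : x = v
    · subst hx; simp [h.1, ih h.2]
    · simp only [List.map_cons, List.sum_cons, if_neg hx, ih h.2, List.mem_cons]
      have : ¬ v = x := fun e => hx e.symm
      simp [this]

-- adding one occurrence of v to ns raises the sum of counts over a Nodup s by its membership bit
theorem sum_counts_cons (s : List Int) (v : Int) (ns : List Int) (h : s.Nodup) :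
    (s.map (fun w => ((v :: ns).count w : Int))).sum
      = (s.map (fun w => (ns.count w : Int))).sum + (if v ∈ s then 1 else 0) := by
  have : ∀ w, ((v :: ns).count w : Int)
      = (ns.count w : Int) + (if w = v then 1 else 0) := by
    intro w
    by_cases hw : w = v
    · subst hw; simp
    · simp [hw, Ne.symm hw]
  simp only [this]
  rw [List.sum_map_add]
  rw [sum_map_indicator s v h]

-- the per-item score sum over ns equals count-sums over the two disjoint Nodup key lists
theorem score_sum_eq (sa sb : List Int) (hsa : sa.Nodup) (hsb : sb.Nodup)
    (hdisj : ∀ v, v ∈ sa → v ∉ sb) (ns : List Int) :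
    (ns.map (fun v => if v ∈ sb then (-1 : Int) else if v ∈ sa then 1 else 0)).sum
      = (sa.map (fun w => (ns.count w : Int))).sum
        - (sb.map (fun w => (ns.count w : Int))).sum := by
  induction ns with
  | nil => simp
  | cons v ns ih =>
    simp only [List.map_cons, List.sum_cons, ih,
      sum_counts_cons sa v ns hsa, sum_counts_cons sb v ns hsb]
    by_cases hb : v ∈ sb
    · have hna : v ∉ sa := fun hva => hdisj v hva hb
      simp only [if_pos hb, if_neg hna]
      omega
    · by_cases ha : v ∈ sa <;> simp [hb, ha] <;> try omega

theorem solve_eq_alt (n a b : List String) : solve n a b = solve_alt n a b := by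
  simp only [solve, solve_alt]
  simp only [foldl_match_ofStr?, PySem.Dict.foldl_insert_getD_add_one_eq_counter]
  set ns := n.filterMap PySem.Int.ofStr? with hns
  set al := a.filterMap PySem.Int.ofStr? with hal
  set bl := b.filterMap PySem.Int.ofStr? with hbl
  -- A's fold is the sum of per-item scores over ns
  have hA : ns.foldl (fun res v =>
        match (bl.foldl (fun d x => d.insert x (-1))
            (al.foldl (fun d x => d.insert x 1) PySem.Dict.empty)).get? v with
        | none => res
        | some s => res + s) 0
      = (ns.map (fun v => if v ∈ PySem.Set.ofList bl then (-1 : Int)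
          else if v ∈ PySem.Set.diff (PySem.Set.ofList al) (PySem.Set.ofList bl) then 1
          else 0)).sum := by
    have h1 : ns.foldl (fun res v =>
          match (bl.foldl (fun d x => d.insert x (-1))
              (al.foldl (fun d x => d.insert x 1) PySem.Dict.empty)).get? v with
          | none => res
          | some s => res + s
          ) 0
        = ns.foldl (fun res v => res + (if v ∈ PySem.Set.ofList bl then (-1 : Int)
            else if v ∈ PySem.Set.diff (PySem.Set.ofList al) (PySem.Set.ofList bl) then 1
            else 0)) 0 := by
      apply PySem.List.foldl_congr_mem
      intro res v _
      rw [get?_foldl_insert_const, get?_foldl_insert_const]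
      simp only [PySem.Dict.get?_empty, PySem.Set.mem_ofList, PySem.Set.mem_diff]
      by_cases hb : v ∈ bl
      · simp [hb]
      · by_cases ha : v ∈ al <;> simp [hb, ha]
    rw [h1, PySem.List.foldl_add]
    simp
  rw [hA]
  rw [score_sum_eq _ _ (PySem.Set.nodup_diff _ _ (PySem.Set.nodup_ofList _))
      (PySem.Set.nodup_ofList _)
      (fun v hv => by
        rw [PySem.Set.mem_diff] at hv
        exact hv.2) ns]
  simp [PySem.Dict.getD_counter]

-- ===== VERDICT (by name: the statement is the Claim_ definition above) =====
theorem solve_spec : Claim_equal_solve := by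
  intro n a b _ _
  exact solve_eq_alt n a b
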